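-- pv_equiv track=rewrite | github.com/Chocksy/cems | src/cems/pattern_extraction.py | extract_severity_from_tags
-- ===== SOURCE A (Python) =====
-- from typing import Literal
--
-- Severity = Literal["block", "warn", "confirm"]
--
-- def extract_severity_from_tags(tags: list[str] | None) -> Severity:
--     """Extract severity level from memory tags.
--
--     Args:
--         tags: List of tags from memory metadata
--
--     Returns:
--         Severity level (block, warn, or confirm)
--     """
--     if not tags:
--         return "warn"
--
--     tags_lower = [t.lower() for t in tags]
--
--     if "block" in tags_lower:
--         return "block"
--     if "confirm" in tags_lower:
--         return "confirm"
--     if "warn" in tags_lower: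
--         return "warn"
--
--     return "warn"
-- ===== SOURCE B (Python) =====
-- def extract_severity_from_tags(tags):
--     """Extract severity level from memory tags (single priority-tracking pass)."""
--     if not tags:
--         return "warn"
--     prio = {"block": 0, "confirm": 1, "warn": 2}
--     best = 3
--     for t in tags:
--         p = prio.get(t.lower())
--         if p is not None and p < best:
--             best = p
--     return ("block", "confirm", "warn", "warn")[best]
-- ===== Notes on version B (the rewrite author's own statement) =====
-- stated objective: alternative
-- what changed: Replaced building a lowered copy of the list plus three separate membership scans with a single pass that tracks the minimum priority seen via a priority map, then maps the best priority back to its keyword.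
import Mathlib
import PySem

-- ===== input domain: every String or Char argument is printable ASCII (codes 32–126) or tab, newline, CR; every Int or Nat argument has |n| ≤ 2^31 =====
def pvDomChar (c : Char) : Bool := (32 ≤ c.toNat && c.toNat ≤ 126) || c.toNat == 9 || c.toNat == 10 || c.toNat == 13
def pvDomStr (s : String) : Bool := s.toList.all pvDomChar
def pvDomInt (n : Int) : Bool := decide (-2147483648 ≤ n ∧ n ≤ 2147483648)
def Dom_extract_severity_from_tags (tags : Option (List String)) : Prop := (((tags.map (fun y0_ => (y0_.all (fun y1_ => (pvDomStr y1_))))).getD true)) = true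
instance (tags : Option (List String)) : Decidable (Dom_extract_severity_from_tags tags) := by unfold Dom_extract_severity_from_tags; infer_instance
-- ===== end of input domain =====

-- B replaces A's lowered-copy-plus-three-membership-scans with a single priority-tracking pass over the tags; alternative decomposition, same O(n) cost.


-- ===== PORT A =====
def extract_severity_from_tags (tags : Option (List String)) : String :=
  match tags with
  | none => "warn"
  | some ts =>
    if ts = [] then "warn"
    else
      let tags_lower := ts.map PySem.Str.lower
      if "block" ∈ tags_lower then "block"
      else if "confirm" ∈ tags_lower then "confirm"
      else if "warn" ∈ tags_lower then "warn"
      else "warn"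

-- ===== PORT B =====
def pvSevPrio : PySem.Dict String Int :=
  PySem.Dict.ofList [("block", 0), ("confirm", 1), ("warn", 2)]

def pvSevStep (best : Int) (t : String) : Int :=
  match pvSevPrio.get? (PySem.Str.lower t) with
  | some p => if p < best then p else best
  | none => best

def extract_severity_from_tags_alt (tags : Option (List String)) : String :=
  match tags with
  | none => "warn"
  | some ts =>
    if ts = [] then "warn"
    else
      let best := ts.foldl pvSevStep 3
      PySem.List.pyGetD ["block", "confirm", "warn", "warn"] best "warn"

-- ===== PRECONDITION & SPEC =====
def Spec_extract_severity_from_tags (tags : Option (List String)) (out : String) : Prop := out = extract_severity_from_tags_alt tags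
instance (tags : Option (List String)) (out : String) : Decidable (Spec_extract_severity_from_tags tags out) := by unfold Spec_extract_severity_from_tags; infer_instance

-- ===== CLAIM (what is proved, stated in full; the proofs are below) =====
def Claim_equal_extract_severity_from_tags : Prop := ∀ (tags : Option (List String)), Dom_extract_severity_from_tags tags → Spec_extract_severity_from_tags tags (extract_severity_from_tags tags)

-- ===== LEMMAS AND PROOFS =====

theorem pvSevPrio_get? (s : String) :
    pvSevPrio.get? s =
      if "block" = s then some 0
      else if "confirm" = s then some 1
      else if "warn" = s then some 2
      else none := by
  have h : pvSevPrio = PySem.Dict.mk [("block", 0), ("confirm", 1), ("warn", 2)] := by decide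
  rw [h]
  simp only [PySem.Dict.get?_mk_cons, beq_iff_eq]
  split_ifs <;> simp_all [PySem.Dict.get?]

-- characterisation of B's fold: the final running best over the whole list
theorem pvSevFold_char (ts : List String) (b : Int) :
    ts.foldl pvSevStep b =
      if "block" ∈ ts.map PySem.Str.lower then min b 0
      else if "confirm" ∈ ts.map PySem.Str.lower then min b 1
      else if "warn" ∈ ts.map PySem.Str.lower then min b 2
      else b := by
  induction ts generalizing b with
  | nil => simp
  | cons t ts ih =>
    rw [List.foldl_cons, ih]
    have hs : pvSevStep b t =
        if "block" = PySem.Str.lower t then min b 0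
        else if "confirm" = PySem.Str.lower t then min b 1
        else if "warn" = PySem.Str.lower t then min b 2
        else b := by
      rw [pvSevStep, pvSevPrio_get?]
      split_ifs <;> simp [min_def] <;> omega
    rw [hs]
    simp only [List.map_cons, List.mem_cons]
    by_cases h1 : "block" = PySem.Str.lower t <;>
      by_cases h2 : "confirm" = PySem.Str.lower t <;>
        by_cases h3 : "warn" = PySem.Str.lower t <;>
          simp [h1, h2, h3, eq_comm, min_def] <;> split_ifs <;> omega

-- ===== VERDICT (by name: the statement is the Claim_ definition above) =====
theorem extract_severity_from_tags_spec : Claim_equal_extract_severity_from_tags := by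
  intro tags _
  unfold Spec_extract_severity_from_tags extract_severity_from_tags extract_severity_from_tags_alt
  match tags with
  | none => rfl
  | some ts =>
    by_cases hnil : ts = []
    · simp [hnil]
    · simp only [if_neg hnil, pvSevFold_char]
      by_cases h1 : "block" ∈ ts.map PySem.Str.lower <;>
        by_cases h2 : "confirm" ∈ ts.map PySem.Str.lower <;>
          by_cases h3 : "warn" ∈ ts.map PySem.Str.lower <;>
            simp [h1, h2, h3] <;> decide
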